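-- pv_equiv track=rewrite | github.com/jjjsssssf/My_engine_and_game | game/funcoes.py | autotile_frames_da_grade
-- ===== SOURCE A (Python) =====
-- def autotile_frames_da_grade(col_inicio, lin_inicio, colunas=4, linhas=4):
--     frames = {}
--     i = 0
--     for r in range(linhas):
--         for c in range(colunas):
--             frames[i] = (col_inicio + c, lin_inicio + r)
--             i += 1
--             if i >= 16:
--                 return frames
--     return frames
-- ===== SOURCE B (Python) =====
-- def autotile_frames_da_grade(col_inicio, lin_inicio, colunas=4, linhas=4):
--     n = min(max(colunas, 0) * max(linhas, 0), 16)
--     return {i: (col_inicio + i % colunas, lin_inicio + i // colunas) for i in range(n)}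
-- ===== Notes on version B (the rewrite author's own statement) =====
-- stated objective: simpler
-- what changed: Replaced the nested row/column loops with a mid-loop early return by a single pass over range(min(colunas*linhas, 16)) that recovers row and column by divmod arithmetic (i // colunas, i % colunas), built as one dict comprehension.
import Mathlib
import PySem

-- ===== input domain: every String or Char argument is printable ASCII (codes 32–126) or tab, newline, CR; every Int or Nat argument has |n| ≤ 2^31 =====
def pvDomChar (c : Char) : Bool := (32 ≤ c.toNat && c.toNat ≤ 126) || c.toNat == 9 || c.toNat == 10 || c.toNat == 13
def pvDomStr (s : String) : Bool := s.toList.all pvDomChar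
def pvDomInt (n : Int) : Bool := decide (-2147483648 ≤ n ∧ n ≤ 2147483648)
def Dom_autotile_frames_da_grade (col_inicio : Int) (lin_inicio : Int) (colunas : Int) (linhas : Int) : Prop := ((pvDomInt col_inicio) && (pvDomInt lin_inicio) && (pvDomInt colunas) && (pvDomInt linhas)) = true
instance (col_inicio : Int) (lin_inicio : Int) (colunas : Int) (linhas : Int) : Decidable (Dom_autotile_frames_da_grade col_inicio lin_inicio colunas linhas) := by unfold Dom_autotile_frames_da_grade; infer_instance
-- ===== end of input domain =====

-- B replaces A's nested loops + mid-loop early return by one pass over range(min(colunas*linhas,16)) with divmod index recovery (objective: simpler).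

-- ===== PORT A =====
-- inner 'for c in range(colunas)' loop; third component = True means the 'return frames' inside fired
def pvA_inner (col0 lin0 r : Int) : List Int → PySem.Dict Int (Int × Int) → Int → (PySem.Dict Int (Int × Int) × Int × Bool)
  | [], frames, i => (frames, i, false)
  | c :: cs, frames, i =>
    let frames' := frames.insert i (col0 + c, lin0 + r)
    let i' := i + 1
    if 16 ≤ i' then (frames', i', true)
    else pvA_inner col0 lin0 r cs frames' i'

-- outer 'for r in range(linhas)' loop
def pvA_outer (col0 lin0 colunas : Int) : List Int → PySem.Dict Int (Int × Int) → Int → PySem.Dict Int (Int × Int)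
  | [], frames, _ => frames
  | r :: rs, frames, i =>
    let res := pvA_inner col0 lin0 r (PySem.List.pyRange 0 colunas 1) frames i
    if res.2.2 then res.1 else pvA_outer col0 lin0 colunas rs res.1 res.2.1

def autotile_frames_da_grade (col_inicio : Int) (lin_inicio : Int) (colunas : Int) (linhas : Int) : List (Int × Int × Int) :=
  (pvA_outer col_inicio lin_inicio colunas (PySem.List.pyRange 0 linhas 1) PySem.Dict.empty 0).items

-- ===== PORT B =====
def autotile_frames_da_grade_alt (col_inicio : Int) (lin_inicio : Int) (colunas : Int) (linhas : Int) : List (Int × Int × Int) :=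
  let n := min (max colunas 0 * max linhas 0) 16
  (PySem.List.pyRange 0 n 1).map
    (fun i => (i, col_inicio + PySem.Int.mod i colunas, lin_inicio + PySem.Int.floordiv i colunas))

-- ===== PRECONDITION & SPEC =====
def Spec_autotile_frames_da_grade (col_inicio : Int) (lin_inicio : Int) (colunas : Int) (linhas : Int) (out : List (Int × Int × Int)) : Prop := out = autotile_frames_da_grade_alt col_inicio lin_inicio colunas linhas
instance (col_inicio : Int) (lin_inicio : Int) (colunas : Int) (linhas : Int) (out : List (Int × Int × Int)) : Decidable (Spec_autotile_frames_da_grade col_inicio lin_inicio colunas linhas out) := by unfold Spec_autotile_frames_da_grade; infer_instance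

-- ===== CLAIM (what is proved, stated in full; the proofs are below) =====
def Claim_equal_autotile_frames_da_grade : Prop := ∀ (col_inicio : Int) (lin_inicio : Int) (colunas : Int) (linhas : Int), Dom_autotile_frames_da_grade col_inicio lin_inicio colunas linhas → Spec_autotile_frames_da_grade col_inicio lin_inicio colunas linhas (autotile_frames_da_grade col_inicio lin_inicio colunas linhas)

-- ===== LEMMAS AND PROOFS =====

-- the entry stored at index i, expressed by divmod (= B's map function)
def pvF (col0 lin0 colunas : Int) (i : Int) : Int × Int × Int :=
  (i, col0 + PySem.Int.mod i colunas, lin0 + PySem.Int.floordiv i colunas)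

lemma pvF_at (col0 lin0 colunas r c i : Int) (hc0 : 0 ≤ c) (hc : c < colunas)
    (hi : i = r * colunas + c) :
    pvF col0 lin0 colunas i = (i, col0 + c, lin0 + r) := by
  have hpos : 0 < colunas := lt_of_le_of_lt hc0 hc
  have hfd : PySem.Int.floordiv i colunas = r := by
    rw [PySem.Int.floordiv_eq_iff_of_pos hpos]; constructor <;> nlinarith
  have hmod : PySem.Int.mod i colunas = c := by
    have := PySem.Int.floordiv_mul_add_mod i colunas
    rw [hfd] at this; omega
  simp [pvF, hfd, hmod]

lemma pvDict_mk_items {κ ν : Type} [BEq κ] (l : List (κ × ν)) :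
    (PySem.Dict.mk l : PySem.Dict κ ν).items = l := rfl

lemma pv_not_contains (col0 lin0 colunas i : Int) :
    (PySem.Dict.mk ((PySem.List.pyRange 0 i 1).map (pvF col0 lin0 colunas))).contains i = false := by
  rw [PySem.Dict.contains_mk]
  simp only [List.any_eq_false, List.mem_map]
  rintro p ⟨j, hj, rfl⟩
  rw [PySem.List.mem_pyRange_one] at hj
  have hne : j ≠ i := by omega
  simp [pvF, hne]

lemma pvA_inner_spec (col0 lin0 colunas r c0 i : Int)
    (hc0 : 0 ≤ c0) (hccol : c0 ≤ colunas) (hi0 : 0 ≤ i) (hi16 : i < 16)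
    (hri : i = r * colunas + c0) :
    pvA_inner col0 lin0 r (PySem.List.pyRange c0 colunas 1)
      (PySem.Dict.mk ((PySem.List.pyRange 0 i 1).map (pvF col0 lin0 colunas))) i =
    (PySem.Dict.mk ((PySem.List.pyRange 0 (i + min (colunas - c0) (16 - i)) 1).map (pvF col0 lin0 colunas)),
     i + min (colunas - c0) (16 - i), decide (i + min (colunas - c0) (16 - i) = 16)) := by
  by_cases h : colunas ≤ c0
  · have hc0' : c0 = colunas := le_antisymm hccol h
    rw [PySem.List.pyRange_one_eq_nil h]
    have ht : min (colunas - c0) (16 - i) = 0 := by omega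
    simp only [pvA_inner, ht]
    simp [show ¬ i = 16 from by omega]
  · push_neg at h
    rw [PySem.List.pyRange_one_cons h]
    have hins : (PySem.Dict.mk ((PySem.List.pyRange 0 i 1).map (pvF col0 lin0 colunas))).insert i
        (col0 + c0, lin0 + r) =
        PySem.Dict.mk ((PySem.List.pyRange 0 (i + 1) 1).map (pvF col0 lin0 colunas)) := by
      apply PySem.Dict.ext
      rw [PySem.Dict.items_insert_of_not_contains _ _ (pv_not_contains col0 lin0 colunas i)]
      rw [pvDict_mk_items, pvDict_mk_items, PySem.List.pyRange_one_succ_right hi0,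
        List.map_append]
      simp [pvF_at col0 lin0 colunas r c0 i hc0 h hri]
    by_cases h16 : 16 ≤ i + 1
    · have ht : min (colunas - c0) (16 - i) = 1 := by omega
      simp only [pvA_inner, hins, if_pos h16, ht]
      simp [show i + 1 = 16 by omega]
    · have hrec := pvA_inner_spec col0 lin0 colunas r (c0 + 1) (i + 1)
        (by omega) (by omega) (by omega) (by omega) (by omega)
      simp only [pvA_inner, hins, if_neg h16]
      rw [hrec]
      have : i + 1 + min (colunas - (c0 + 1)) (16 - (i + 1)) = i + min (colunas - c0) (16 - i) := by
        omega
      rw [this]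
termination_by (colunas - c0).toNat
decreasing_by omega

lemma pvA_outer_nonpos (col0 lin0 colunas : Int) (hcol : colunas ≤ 0)
    (rs : List Int) (frames : PySem.Dict Int (Int × Int)) (i : Int) :
    pvA_outer col0 lin0 colunas rs frames i = frames := by
  induction rs with
  | nil => rfl
  | cons r rs ih =>
    rw [pvA_outer, PySem.List.pyRange_one_eq_nil hcol]
    simpa [pvA_inner] using ih

lemma pvA_outer_spec (col0 lin0 colunas linhas r0 : Int) (hcol : 0 < colunas)
    (hr0 : 0 ≤ r0) (hi16 : r0 * colunas < 16) :
    pvA_outer col0 lin0 colunas (PySem.List.pyRange r0 linhas 1)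
      (PySem.Dict.mk ((PySem.List.pyRange 0 (r0 * colunas) 1).map (pvF col0 lin0 colunas)))
      (r0 * colunas) =
    PySem.Dict.mk ((PySem.List.pyRange 0 (min (colunas * max linhas r0) 16) 1).map
      (pvF col0 lin0 colunas)) := by
  by_cases h : linhas ≤ r0
  · rw [PySem.List.pyRange_one_eq_nil h]
    have hmax : max linhas r0 = r0 := by omega
    have hc : colunas * r0 = r0 * colunas := mul_comm _ _
    have : min (colunas * max linhas r0) 16 = r0 * colunas := by rw [hmax]; omega
    rw [this]; rfl
  · push_neg at h
    rw [PySem.List.pyRange_one_cons h]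
    have hinner := pvA_inner_spec col0 lin0 colunas r0 0 (r0 * colunas)
      le_rfl (by omega) (by positivity) hi16 (by omega)
    simp only [pvA_outer, hinner, sub_zero]
    have hexp : (r0 + 1) * colunas = r0 * colunas + colunas := by ring
    by_cases hfl : r0 * colunas + min colunas (16 - r0 * colunas) = 16
    · have hge : 16 ≤ (r0 + 1) * colunas := by omega
      have hlin : (r0 + 1) * colunas ≤ colunas * linhas := by nlinarith
      have hmin : min (colunas * max linhas r0) 16 = 16 := by
        have hmax : max linhas r0 = linhas := by omega
        rw [hmax]; omega
      rw [hfl, hmin]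
      simp
    · have hstep : r0 * colunas + min colunas (16 - r0 * colunas) = (r0 + 1) * colunas := by
        omega
      have hnext : (r0 + 1) * colunas < 16 := by omega
      rw [decide_eq_false hfl, hstep]
      have hrec := pvA_outer_spec col0 lin0 colunas linhas (r0 + 1) hcol (by omega) hnext
      have hmaxeq : max linhas (r0 + 1) = max linhas r0 := by omega
      simp only [Bool.false_eq_true, if_false]
      rw [hrec, hmaxeq]
termination_by (linhas - r0).toNat
decreasing_by omega

-- ===== VERDICT (by name: the statement is the Claim_ definition above) =====
theorem autotile_frames_da_grade_spec : Claim_equal_autotile_frames_da_grade := by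
  intro col0 lin0 colunas linhas _
  unfold Spec_autotile_frames_da_grade autotile_frames_da_grade autotile_frames_da_grade_alt
  by_cases hcol : 0 < colunas
  · have h := pvA_outer_spec col0 lin0 colunas linhas 0 hcol le_rfl (by omega)
    simp only [zero_mul] at h
    have hemp : (PySem.Dict.mk ((PySem.List.pyRange 0 0 1).map (pvF col0 lin0 colunas)) :
        PySem.Dict Int (Int × Int)) = PySem.Dict.empty := by
      apply PySem.Dict.ext
      rw [pvDict_mk_items, PySem.List.pyRange_one_eq_nil le_rfl]
      rfl
    rw [hemp] at h
    rw [h, pvDict_mk_items, show max colunas 0 = colunas from by omega]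
    rfl
  · push_neg at hcol
    rw [pvA_outer_nonpos col0 lin0 colunas hcol]
    have hn : min (max colunas 0 * max linhas 0) 16 = (0 : Int) := by
      rw [show max colunas 0 = (0:Int) from by omega]; simp
    simp only [hn]
    rw [PySem.List.pyRange_one_eq_nil le_rfl]
    rfl
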